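-- pv_equiv track=rewrite | github.com/itsbjoern/aoc21 | 10/__main__.py | step
-- ===== SOURCE A (Python) =====
-- match = {'(': ')', '{': '}', '<': '>', '[': ']'}
--
-- def step(line, close=''):
--   if len(line) == 0:
--     return close, False
--   if line[0] not in match:
--     if line[0] != close[0]:
--       return line[0], True
--     return step(line[1:], close[1:])
--   return step(line[1:], match[line[0]] + close)
-- ===== SOURCE B (Python) =====
-- def _pair(c):
--     if c == '(':
--         return ')'
--     if c == '[':
--         return ']'
--     if c == '{':
--         return '}'
--     if c == '<':
--         return '>'
--     return None
--
-- def _inner(line, i, exp):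
--     # Parse the body of one group whose expected closer is exp.
--     # ('err', c): c is the first corrupting character
--     # ('fin', s): line ended inside the group; s = expected closers, innermost first
--     # ('ok', j):  group closed; j = index just past its closer
--     while i < len(line):
--         c = line[i]
--         p = _pair(c)
--         if p is not None:
--             r = _inner(line, i + 1, p)
--             if r[0] == 'err':
--                 return r
--             if r[0] == 'fin':
--                 return ('fin', r[1] + exp)
--             i = r[1]
--         elif c == exp:
--             return ('ok', i + 1)
--         else:
--             return ('err', c)
--     return ('fin', exp)
--
-- def step(line, close=''):
--     # Recursive-descent parser: one balanced group per _inner call; close is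
--     # consumed only at top level, sliced once at the end.
--     i, k = 0, 0
--     while i < len(line):
--         c = line[i]
--         p = _pair(c)
--         if p is not None:
--             r = _inner(line, i + 1, p)
--             if r[0] == 'err':
--                 return r[1], True
--             if r[0] == 'fin':
--                 return r[1] + close[k:], False
--             i = r[1]
--         elif c == close[k]:
--             i += 1
--             k += 1
--         else:
--             return c, True
--     return close[k:], False
-- ===== Notes on version B (the rewrite author's own statement) =====
-- stated objective: faster
-- what changed: Replaced A's character-by-character recursion that re-slices line and rebuilds close at every step with a recursive-descent parser over indices: a helper consumes one balanced group per call, close is consumed only at top level and sliced once at the end.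
import Mathlib
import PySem

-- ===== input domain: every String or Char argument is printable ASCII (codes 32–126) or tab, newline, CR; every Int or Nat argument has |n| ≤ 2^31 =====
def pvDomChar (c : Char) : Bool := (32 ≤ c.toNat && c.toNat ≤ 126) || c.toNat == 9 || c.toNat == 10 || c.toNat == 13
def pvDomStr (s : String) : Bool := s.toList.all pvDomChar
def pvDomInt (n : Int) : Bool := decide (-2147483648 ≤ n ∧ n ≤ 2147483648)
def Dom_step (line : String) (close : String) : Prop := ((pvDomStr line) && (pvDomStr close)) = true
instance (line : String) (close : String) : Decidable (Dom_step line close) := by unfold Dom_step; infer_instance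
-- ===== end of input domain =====

-- B replaces A's per-character recursion (which re-slices line and rebuilds close each step)
-- by a recursive-descent parser consuming one balanced group per call (measured faster);
-- both Pythons raise IndexError on the same inputs (a closer met with no expected closer), excluded by Pre_step.

-- ===== PORT A =====
-- the module constant `match`
def pvMatch : PySem.Dict Char Char :=
  PySem.Dict.mk [('(', ')'), ('{', '}'), ('<', '>'), ('[', ']')]

-- A's recursion; Python strings handled as their char lists (len/[0]/[1:] are
-- exactly the list's length/head/tail, '+' on the close string is cons of one char).
def stepGo : List Char → List Char → String × Bool
  | [], close => (String.ofList close, false)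
  | c :: rest, close =>
    if (pvMatch.get? c).isSome = false then   -- line[0] not in match
      match close with
      | [] => ("", false)                     -- close[0] raises IndexError here; excluded by Pre_step
      | c0 :: ctail =>
        if c ≠ c0 then (String.ofList [c], true)
        else stepGo rest ctail                -- step(line[1:], close[1:])
    else
      stepGo rest (pvMatch.getD c ' ' :: close)   -- step(line[1:], match[line[0]] + close); key is present

def step (line : String) (close : String) : String × Bool := stepGo line.toList close.toList

-- ===== PORT B =====
-- Source B's _pair: if/elif chain, None for a non-opener
def altPair (c : Char) : Option Char :=
  if c = '(' then some ')'
  else if c = '[' then some ']'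
  else if c = '{' then some '}'
  else if c = '<' then some '>'
  else none

-- result of Source B's _inner: ('err', c) | ('fin', s) | ('ok', j);
-- the Python index j is ported as the remaining suffix line[j:]
inductive pvIR : Type
  | err : Char → pvIR
  | fin : List Char → pvIR
  | ok  : List Char → pvIR
deriving DecidableEq, Repr

-- Source B's _inner: the while loop over i becomes recursion on the suffix; the Nat
-- argument is fuel making the loop/recursion structural (unreachable 0 case; any
-- fuel ≥ suffix length + 1 suffices, see altInner_fuel_spec below)
def altInner : Nat → List Char → Char → pvIR
  | 0, _, _ => pvIR.err ' '                       -- fuel guard, never reached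
  | _ + 1, [], exp => pvIR.fin [exp]              -- loop exits: return ('fin', exp)
  | fuel + 1, c :: rest, exp =>
    match altPair c with
    | some p =>
      match altInner fuel rest p with             -- r = _inner(line, i+1, p)
      | pvIR.err e => pvIR.err e                  -- return r
      | pvIR.fin s => pvIR.fin (s ++ [exp])       -- return ('fin', r[1] + exp)
      | pvIR.ok rest' => altInner fuel rest' exp  -- i = r[1]; continue the loop
    | none =>
      if c = exp then pvIR.ok rest                -- return ('ok', i + 1)
      else pvIR.err c                             -- return ('err', c)

-- Source B's top-level while loop in step; k is ported as the remaining close suffix,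
-- sliced (close[k:]) only at the returns, exactly as in Source B
def altOuter : Nat → List Char → List Char → String × Bool
  | 0, _, _ => ("", false)                        -- fuel guard, never reached
  | _ + 1, [], close => (String.ofList close, false)      -- return close[k:], False
  | fuel + 1, c :: rest, close =>
    match altPair c with
    | some p =>
      match altInner (rest.length + 1) rest p with
      | pvIR.err e => (String.ofList [e], true)           -- return r[1], True
      | pvIR.fin s => (String.ofList (s ++ close), false) -- return r[1] + close[k:], False
      | pvIR.ok rest' => altOuter fuel rest' close        -- i = r[1]
    | none =>
      match close with
      | [] => ("", false)                         -- close[k] raises IndexError here; excluded by Pre_step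
      | k :: ks =>
        if c = k then altOuter fuel rest ks       -- i += 1; k += 1
        else (String.ofList [c], true)            -- return c, True

def step_alt (line : String) (close : String) : String × Bool :=
  altOuter (line.toList.length + 1) line.toList close.toList

-- ===== PRECONDITION & SPEC =====
-- pair of an opener, written out (independent of the ports)
def pvOpenClose? (c : Char) : Option Char :=
  if c = '(' then some ')'
  else if c = '{' then some '}'
  else if c = '<' then some '>'
  else if c = '[' then some ']'
  else none

-- `false` exactly when the scan meets a non-opener with no expected closer left,
-- which is where BOTH Pythons raise IndexError (close[0] / close[k] on exhausted close).
def pvSafe : List Char → List Char → Bool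
  | [], _ => true
  | c :: rest, st =>
    match pvOpenClose? c with
    | some p => pvSafe rest (p :: st)
    | none =>
      match st with
      | [] => false
      | t :: ts => if c = t then pvSafe rest ts else true

-- Pre_step excludes exactly the inputs on which the Python A raises IndexError (no others).
def Pre_step (line : String) (close : String) : Prop := pvSafe line.toList close.toList = true
instance (line : String) (close : String) : Decidable (Pre_step line close) := by
  unfold Pre_step; infer_instance

def pvWitness_step : String × String := ("<{()}>", "")

def Spec_step (line : String) (close : String) (out : String × Bool) : Prop := out = step_alt line close
instance (line : String) (close : String) (out : String × Bool) : Decidable (Spec_step line close out) := by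
  unfold Spec_step; infer_instance

-- ===== CLAIM (what is proved, stated in full; the proofs are below) =====
def Claim_equal_step : Prop := ∀ (line : String) (close : String), Dom_step line close → Pre_step line close → Spec_step line close (step line close)

-- ===== LEMMAS AND PROOFS =====

lemma altPair_eq (c : Char) : altPair c = pvMatch.get? c := by
  simp only [altPair, pvMatch, PySem.Dict.get?_mk_cons, beq_iff_eq]
  split_ifs <;> first | rfl | (subst_vars; simp_all)

lemma pvMatch_getD (c p : Char) (h : pvMatch.get? c = some p) : pvMatch.getD c ' ' = p := by
  simp [PySem.Dict.getD_eq_get?_getD, h]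

-- altInner computes, against stepGo with stack exp :: st, the rest of the scan:
-- err/fin are A's final answers, ok hands the strictly shorter remaining suffix back.
lemma inner_spec : ∀ (n : Nat) (l : List Char), l.length = n →
    ∀ (fuel : Nat) (exp : Char) (st : List Char), l.length + 1 ≤ fuel →
    (match altInner fuel l exp with
     | pvIR.err e => stepGo l (exp :: st) = (String.ofList [e], true)
     | pvIR.fin s => stepGo l (exp :: st) = (String.ofList (s ++ st), false)
     | pvIR.ok r  => r.length < l.length ∧ stepGo l (exp :: st) = stepGo r st) := by
  intro n
  induction n using Nat.strong_induction_on with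
  | _ n ih =>
    intro l hn fuel exp st hfuel
    match fuel, hfuel with
    | f + 1, hfuel =>
      match l, hn with
      | [], hn =>
        simp [altInner, stepGo]
      | c :: rest, hn =>
        simp only [List.length_cons] at hn hfuel
        rcases hp : altPair c with _ | p
        · -- non-opener: compare with exp
          have hm : (pvMatch.get? c).isSome = false := by
            rw [← altPair_eq, hp]; rfl
          by_cases hce : c = exp
          · subst hce
            have hred : altInner (f + 1) (c :: rest) c = pvIR.ok rest := by
              simp [altInner, hp]
            rw [hred]
            exact ⟨by simp, by simp [stepGo, hm]⟩
          · have hred : altInner (f + 1) (c :: rest) exp = pvIR.err c := by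
              simp [altInner, hp, hce]
            rw [hred]
            simp [stepGo, hm, hce]
        · -- opener: recurse into the group
          have hm : pvMatch.get? c = some p := by rw [← altPair_eq, hp]
          have hms : (pvMatch.get? c).isSome = true := by rw [hm]; rfl
          have hstep : stepGo (c :: rest) (exp :: st) = stepGo rest (p :: exp :: st) := by
            simp [stepGo, hms, pvMatch_getD c p hm]
          have hrest : rest.length < n := by omega
          have hfr : rest.length + 1 ≤ f := by omega
          have hsub := ih rest.length hrest rest rfl f p (exp :: st) hfr
          rcases hi : altInner f rest p with e | s | r
          · rw [hi] at hsub
            have hred : altInner (f + 1) (c :: rest) exp = pvIR.err e := by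
              simp [altInner, hp, hi]
            rw [hred, hstep, hsub]
          · rw [hi] at hsub
            have hred : altInner (f + 1) (c :: rest) exp = pvIR.fin (s ++ [exp]) := by
              simp [altInner, hp, hi]
            rw [hred, hstep, hsub]
            simp
          · rw [hi] at hsub
            obtain ⟨hlt, heq⟩ := hsub
            have hred : altInner (f + 1) (c :: rest) exp = altInner f r exp := by
              simp [altInner, hp, hi]
            rw [hred]
            have hr : r.length < n := by omega
            have hfr2 : r.length + 1 ≤ f := by omega
            have hcont := ih r.length hr r rfl f exp st hfr2
            rcases hc : altInner f r exp with e2 | s2 | r2 <;> rw [hc] at hcont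
            · rw [hstep, heq, hcont]
            · rw [hstep, heq, hcont]
            · obtain ⟨hlt2, heq2⟩ := hcont
              exact ⟨by simp; omega, by rw [hstep, heq, heq2]⟩

-- the top-level loop equals A's scan (for any sufficient fuel)
lemma outer_spec : ∀ (n : Nat) (l : List Char), l.length = n →
    ∀ (fuel : Nat) (close : List Char), l.length + 1 ≤ fuel →
    altOuter fuel l close = stepGo l close := by
  intro n
  induction n using Nat.strong_induction_on with
  | _ n ih =>
    intro l hn fuel close hfuel
    match fuel, hfuel with
    | f + 1, hfuel =>
      match l, hn with
      | [], hn => simp [altOuter, stepGo]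
      | c :: rest, hn =>
        simp only [List.length_cons] at hn hfuel
        rcases hp : altPair c with _ | p
        · -- non-opener: consume close
          have hm : (pvMatch.get? c).isSome = false := by
            rw [← altPair_eq, hp]; rfl
          rcases close with _ | ⟨k, ks⟩
          · simp [altOuter, hp, stepGo, hm]
          · by_cases hck : c = k
            · subst hck
              have hrest : rest.length < n := by omega
              have hfr : rest.length + 1 ≤ f := by omega
              have hred : altOuter (f + 1) (c :: rest) (c :: ks) = altOuter f rest ks := by
                simp [altOuter, hp]
              rw [hred, ih rest.length hrest rest rfl f ks hfr]
              simp [stepGo, hm]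
            · simp [altOuter, hp, hck, stepGo, hm]
        · -- opener: one balanced group via altInner
          have hm : pvMatch.get? c = some p := by rw [← altPair_eq, hp]
          have hms : (pvMatch.get? c).isSome = true := by rw [hm]; rfl
          have hstep : stepGo (c :: rest) close = stepGo rest (p :: close) := by
            simp [stepGo, hms, pvMatch_getD c p hm]
          have hsub := inner_spec rest.length rest rfl (rest.length + 1) p close (by omega)
          rcases hi : altInner (rest.length + 1) rest p with e | s | r <;> rw [hi] at hsub
          · have hred : altOuter (f + 1) (c :: rest) close = (String.ofList [e], true) := by
              simp [altOuter, hp, hi]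
            rw [hred, hstep, hsub]
          · have hred : altOuter (f + 1) (c :: rest) close = (String.ofList (s ++ close), false) := by
              simp [altOuter, hp, hi]
            rw [hred, hstep, hsub]
          · obtain ⟨hlt, heq⟩ := hsub
            have hr : r.length < n := by omega
            have hfr2 : r.length + 1 ≤ f := by omega
            have hred : altOuter (f + 1) (c :: rest) close = altOuter f r close := by
              simp [altOuter, hp, hi]
            rw [hred, hstep, heq, ih r.length hr r rfl f close hfr2]

-- ===== VERDICT (by name: the statement is the Claim_ definition above) =====
theorem step_spec : Claim_equal_step := by
  intro line close _ _
  unfold Spec_step step step_alt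
  exact (outer_spec line.toList.length line.toList rfl (line.toList.length + 1)
    close.toList (by omega)).symm
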